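-- pv_equiv track=rewrite | github.com/8-oo-8/python_files | challengingProject/task3.py | tolling
-- ===== SOURCE A (Python) =====
-- def tolling(program, start, tolls):
--     car = start
--     tollCount = 0
--
--     for action in program:
--         if action == "Drive":
--             car = drive(car)
--             # If the car moves (change position), then check whether
--             # moved into some toll position
--             for toll in list(tolls.keys()):
--                 if car[0] == toll[0] and car[1] == toll[1]:
--                     # If in the toll position, add corresponding value
--                     tollCount += tolls[toll]
--         elif action == "TurnL":
--             car = turnL(car)
--         elif action == "TurnR":
--             car = turnR(car)
--
--     return tollCount
--
-- def turnR(current):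
--     x = current[0]
--     y = current[1]
--     direction = current[2]
--     if direction == 'N':
--         return (x, y, 'E')
--     elif direction == 'E':
--         return (x, y, 'S')
--     elif direction == 'S':
--         return (x,y ,'W')
--     else:
--         return (x, y, 'N')
--
-- def turnL(current):
--     x = current[0]
--     y = current[1]
--     direction = current[2]
--
--     if direction == 'N':
--         return (x, y, 'W')
--     elif direction == 'W':
--         return (x, y, 'S')
--     elif direction == 'S':
--         return (x, y, 'E')
--     else:
--         return (x, y, 'N')
--
-- def drive(current):
--     x = current[0]
--     y = current[1]
--     direction = current[2]
--
--     if direction == 'N':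
--         return (x, y + 1, direction)
--     elif direction == 'E':
--         return (x + 1, y, direction)
--     elif direction == 'S':
--         return (x, y - 1, direction)
--     else:
--         return (x - 1, y, direction)
-- ===== SOURCE B (Python) =====
-- def tolling(program, start, tolls):
--     x, y, d = start
--     visits = {}
--     for action in program:
--         if action == "Drive":
--             dx, dy = {'N': (0, 1), 'E': (1, 0), 'S': (0, -1)}.get(d, (-1, 0))
--             x += dx
--             y += dy
--             visits[(x, y)] = visits.get((x, y), 0) + 1
--         elif action == "TurnL":
--             d = {'N': 'W', 'W': 'S', 'S': 'E'}.get(d, 'N')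
--         elif action == "TurnR":
--             d = {'N': 'E', 'E': 'S', 'S': 'W'}.get(d, 'N')
--     total = 0
--     for key, value in tolls.items():
--         total += value * visits.get((key[0], key[1]), 0)
--     return total
-- ===== Notes on version B (the rewrite author's own statement) =====
-- stated objective: alternative
-- what changed: Instead of rescanning the whole tolls dict on every Drive, B keeps a visit-count dict keyed by (x,y) during a single simulation pass and then makes one separate pass over tolls adding value * visit-count.
import Mathlib
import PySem

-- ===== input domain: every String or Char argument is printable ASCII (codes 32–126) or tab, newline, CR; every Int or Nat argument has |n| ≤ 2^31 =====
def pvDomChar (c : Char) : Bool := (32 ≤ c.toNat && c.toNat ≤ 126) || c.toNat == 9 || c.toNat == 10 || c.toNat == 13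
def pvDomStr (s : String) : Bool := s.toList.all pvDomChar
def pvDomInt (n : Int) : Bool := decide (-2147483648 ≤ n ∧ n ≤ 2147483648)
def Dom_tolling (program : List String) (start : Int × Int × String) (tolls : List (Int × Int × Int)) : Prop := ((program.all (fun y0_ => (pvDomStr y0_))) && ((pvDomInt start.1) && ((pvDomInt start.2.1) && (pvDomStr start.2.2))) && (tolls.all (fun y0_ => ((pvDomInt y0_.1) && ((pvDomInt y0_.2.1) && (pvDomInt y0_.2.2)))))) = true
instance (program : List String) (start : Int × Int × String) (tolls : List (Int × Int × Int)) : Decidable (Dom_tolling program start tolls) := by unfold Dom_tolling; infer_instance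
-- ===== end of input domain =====

-- B replaces A's rescan of the tolls dict on every Drive by a visit-count dict filled in one
-- simulation pass plus one separate pass over tolls (objective: alternative decomposition).

-- ===== PORT A =====
def pyTurnR (current : Int × Int × String) : Int × Int × String :=
  let x := current.1
  let y := current.2.1
  let direction := current.2.2
  if direction == "N" then (x, y, "E")
  else if direction == "E" then (x, y, "S")
  else if direction == "S" then (x, y, "W")
  else (x, y, "N")

def pyTurnL (current : Int × Int × String) : Int × Int × String :=
  let x := current.1
  let y := current.2.1
  let direction := current.2.2
  if direction == "N" then (x, y, "W")
  else if direction == "W" then (x, y, "S")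
  else if direction == "S" then (x, y, "E")
  else (x, y, "N")

def pyDrive (current : Int × Int × String) : Int × Int × String :=
  let x := current.1
  let y := current.2.1
  let direction := current.2.2
  if direction == "N" then (x, y + 1, direction)
  else if direction == "E" then (x + 1, y, direction)
  else if direction == "S" then (x, y - 1, direction)
  else (x - 1, y, direction)

-- tolls[toll]: dict lookup, first entry of the association list whose (x,y) key matches
-- (the key always comes from the list itself, so the `none` default 0 is never hit).
def pyTollLookup (tolls : List (Int × Int × Int)) (k : Int × Int) : Int :=
  match tolls.find? (fun t => t.1 == k.1 && t.2.1 == k.2) with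
  | some t => t.2.2
  | none => 0

def tollingStep (tolls : List (Int × Int × Int)) (st : (Int × Int × String) × Int)
    (action : String) : (Int × Int × String) × Int :=
  if action == "Drive" then
    let car := pyDrive st.1
    let cnt := tolls.foldl (fun cnt toll =>
      if car.1 == toll.1 && car.2.1 == toll.2.1 then cnt + pyTollLookup tolls (toll.1, toll.2.1)
      else cnt) st.2
    (car, cnt)
  else if action == "TurnL" then (pyTurnL st.1, st.2)
  else if action == "TurnR" then (pyTurnR st.1, st.2)
  else st

def tolling (program : List String) (start : Int × Int × String) (tolls : List (Int × Int × Int)) : Int :=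
  (program.foldl (tollingStep tolls) (start, 0)).2

-- ===== PORT B =====
def altDelta (d : String) : Int × Int :=
  if d == "N" then (0, 1) else if d == "E" then (1, 0) else if d == "S" then (0, -1) else (-1, 0)

def altLeft (d : String) : String :=
  if d == "N" then "W" else if d == "W" then "S" else if d == "S" then "E" else "N"

def altRight (d : String) : String :=
  if d == "N" then "E" else if d == "E" then "S" else if d == "S" then "W" else "N"

def altStep (s : (Int × Int × String) × PySem.Dict (Int × Int) Int) (action : String) :
    (Int × Int × String) × PySem.Dict (Int × Int) Int :=
  let x := s.1.1
  let y := s.1.2.1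
  let d := s.1.2.2
  if action == "Drive" then
    let δ := altDelta d
    let x := x + δ.1
    let y := y + δ.2
    ((x, y, d), s.2.insert (x, y) (s.2.getD (x, y) 0 + 1))
  else if action == "TurnL" then ((x, y, altLeft d), s.2)
  else if action == "TurnR" then ((x, y, altRight d), s.2)
  else s

def tolling_alt (program : List String) (start : Int × Int × String) (tolls : List (Int × Int × Int)) : Int :=
  let st := program.foldl altStep (start, PySem.Dict.empty)
  tolls.foldl (fun total t => total + t.2.2 * st.2.getD (t.1, t.2.1) 0) 0

-- ===== PRECONDITION & SPEC =====
-- In Python `tolls` is a dict, so its (x,y) keys are necessarily distinct; Pre_ states exactly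
-- that for the association-list representation (it excludes no input a Python caller can pass).
def Pre_tolling (program : List String) (start : Int × Int × String) (tolls : List (Int × Int × Int)) : Prop :=
  (tolls.map (fun t => (t.1, t.2.1))).Nodup

instance (program : List String) (start : Int × Int × String) (tolls : List (Int × Int × Int)) : Decidable (Pre_tolling program start tolls) := by unfold Pre_tolling; infer_instance

def pvWitness_tolling : List String × (Int × Int × String) × (List (Int × Int × Int)) :=
  (["Drive", "TurnR", "Drive"], (0, 0, "N"), [(0, 1, 5), (1, 1, 2)])

def Spec_tolling (program : List String) (start : Int × Int × String) (tolls : List (Int × Int × Int)) (out : Int) : Prop := out = tolling_alt program start tolls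
instance (program : List String) (start : Int × Int × String) (tolls : List (Int × Int × Int)) (out : Int) : Decidable (Spec_tolling program start tolls out) := by unfold Spec_tolling; infer_instance

-- ===== CLAIM (what is proved, stated in full; the proofs are below) =====
def Claim_equal_tolling : Prop := ∀ (program : List String) (start : Int × Int × String) (tolls : List (Int × Int × Int)), Dom_tolling program start tolls → Pre_tolling program start tolls → Spec_tolling program start tolls (tolling program start tolls)

-- ===== LEMMAS AND PROOFS =====

-- the car after running `program`, and the (x,y) position after each Drive, in order
def carOf : List String → (Int × Int × String) → Int × Int × String
  | [], car => car
  | a :: rest, car =>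
    if a == "Drive" then carOf rest (pyDrive car)
    else if a == "TurnL" then carOf rest (pyTurnL car)
    else if a == "TurnR" then carOf rest (pyTurnR car)
    else carOf rest car

def visitsOf : List String → (Int × Int × String) → List (Int × Int)
  | [], _ => []
  | a :: rest, car =>
    if a == "Drive" then
      let c := pyDrive car
      (c.1, c.2.1) :: visitsOf rest c
    else if a == "TurnL" then visitsOf rest (pyTurnL car)
    else if a == "TurnR" then visitsOf rest (pyTurnR car)
    else visitsOf rest car


-- the three state-transition helpers of the two ports agree
theorem drive_eq (car : Int × Int × String) :
    pyDrive car = (car.1 + (altDelta car.2.2).1, car.2.1 + (altDelta car.2.2).2, car.2.2) := by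
  obtain ⟨x, y, d⟩ := car
  simp only [pyDrive, altDelta]
  split_ifs <;> simp_all [sub_eq_add_neg]

theorem turnL_eq (car : Int × Int × String) :
    pyTurnL car = (car.1, car.2.1, altLeft car.2.2) := by
  obtain ⟨x, y, d⟩ := car
  simp only [pyTurnL, altLeft]
  split_ifs <;> simp_all

theorem turnR_eq (car : Int × Int × String) :
    pyTurnR car = (car.1, car.2.1, altRight car.2.2) := by
  obtain ⟨x, y, d⟩ := car
  simp only [pyTurnR, altRight]
  split_ifs <;> simp_all

theorem foldl_if_const {α : Type} (l : List α) (q : α → Bool) (k : Int) (acc : Int) :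
    l.foldl (fun c t => if q t then c + k else c) acc = acc + (l.countP q : Int) * k := by
  induction l generalizing acc with
  | nil => simp
  | cons t rest ih =>
    by_cases h : q t <;> simp [List.foldl_cons, h, ih, List.countP_cons] <;> push_cast <;> ring

-- key of a toll entry
def keyOf (t : Int × Int × Int) : Int × Int := (t.1, t.2.1)

theorem countP_mul_lookup (tolls : List (Int × Int × Int)) (px py : Int)
    (hnd : (tolls.map keyOf).Nodup) :
    ((tolls.countP (fun t => px == t.1 && py == t.2.1)) : Int) * pyTollLookup tolls (px, py)
      = pyTollLookup tolls (px, py) := by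
  induction tolls with
  | nil => simp [pyTollLookup]
  | cons t rest ih =>
    simp only [List.map_cons, List.nodup_cons] at hnd
    by_cases h : keyOf t = (px, py)
    · have hq : (px == t.1 && py == t.2.1) = true := by
        simp only [keyOf, Prod.ext_iff] at h; simp [h.1, h.2]
      have hq' : (t.1 == (px, py).1 && t.2.1 == (px, py).2) = true := by
        simp only [keyOf, Prod.ext_iff] at h; simp [h.1, h.2]
      have hrest : rest.countP (fun t => px == t.1 && py == t.2.1) = 0 := by
        rw [List.countP_eq_zero]
        intro u hu
        simp only [Bool.and_eq_true, beq_iff_eq, not_and]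
        intro h1 h2
        apply hnd.1
        refine List.mem_map.mpr ⟨u, hu, ?_⟩
        simp only [keyOf, Prod.ext_iff] at h ⊢
        constructor <;> omega
      simp [List.countP_cons, hq, hrest, pyTollLookup, hq']
    · have hq : (px == t.1 && py == t.2.1) = false := by
        simp only [keyOf, Prod.ext_iff] at h
        by_cases h1 : px = t.1 <;> simp [h1] <;> omega
      have hq' : (t.1 == (px, py).1 && t.2.1 == (px, py).2) = false := by
        simp only [keyOf, Prod.ext_iff] at h
        by_cases h1 : t.1 = px <;> simp [h1] <;> omega
      have hl : pyTollLookup (t :: rest) (px, py) = pyTollLookup rest (px, py) := by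
        simp [pyTollLookup, hq']
      simp [List.countP_cons, hq, hl, ih hnd.2]

-- A's inner loop over tolls adds exactly the toll at the car's position
theorem inner_loop_eq (tolls : List (Int × Int × Int)) (px py : Int)
    (hnd : (tolls.map keyOf).Nodup) (acc : Int) :
    tolls.foldl (fun cnt toll =>
        if px == toll.1 && py == toll.2.1 then cnt + pyTollLookup tolls (toll.1, toll.2.1)
        else cnt) acc
      = acc + pyTollLookup tolls (px, py) := by
  have hcongr : tolls.foldl (fun cnt toll =>
        if px == toll.1 && py == toll.2.1 then cnt + pyTollLookup tolls (toll.1, toll.2.1)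
        else cnt) acc
      = tolls.foldl (fun cnt toll =>
        if (fun t => px == t.1 && py == t.2.1) toll then cnt + pyTollLookup tolls (px, py)
        else cnt) acc := by
    apply PySem.List.foldl_congr_mem
    intro a x _hx
    by_cases h : (px == x.1 && py == x.2.1) = true
    · have h1 : (x.1, x.2.1) = ((px, py) : Int × Int) := by
        simp only [Bool.and_eq_true, beq_iff_eq] at h
        simp [Prod.ext_iff, h.1, h.2]
      simp only [h, if_pos, h1]
    · simp only [Bool.not_eq_true] at h
      simp [h]
  rw [hcongr, foldl_if_const, countP_mul_lookup tolls px py hnd]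

-- A's outer loop computes carOf and the sum of lookups over the visited positions
theorem A_loop (tolls : List (Int × Int × Int)) (hnd : (tolls.map keyOf).Nodup) :
    ∀ (program : List String) (car : Int × Int × String) (acc : Int),
      program.foldl (tollingStep tolls) (car, acc)
        = (carOf program car, acc + ((visitsOf program car).map (pyTollLookup tolls)).sum) := by
  intro program
  induction program with
  | nil => intro car acc; simp [carOf, visitsOf]
  | cons a rest ih =>
    intro car acc
    by_cases hD : a == "Drive"
    · simp only [List.foldl_cons, tollingStep, hD, if_pos, carOf, visitsOf]
      rw [inner_loop_eq tolls _ _ hnd, ih]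
      simp [add_assoc]
    · by_cases hL : a == "TurnL"
      · simp [List.foldl_cons, tollingStep, hD, hL, carOf, visitsOf, ih]
      · by_cases hR : a == "TurnR"
        · simp [List.foldl_cons, tollingStep, hD, hL, hR, carOf, visitsOf, ih]
        · simp [List.foldl_cons, tollingStep, hD, hL, hR, carOf, visitsOf, ih]

-- B's simulation loop computes carOf and the visit counter of the visited positions
theorem B_loop : ∀ (program : List String) (car : Int × Int × String)
    (d : PySem.Dict (Int × Int) Int),
    program.foldl altStep (car, d)
      = (carOf program car,
         (visitsOf program car).foldl (fun d p => d.insert p (d.getD p 0 + 1)) d) := by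
  intro program
  induction program with
  | nil => intro car d; simp [carOf, visitsOf]
  | cons a rest ih =>
    intro car d
    by_cases hD : a == "Drive"
    · simp only [List.foldl_cons, altStep, hD, if_pos, carOf, visitsOf]
      rw [ih, drive_eq car]
    · by_cases hL : a == "TurnL"
      · simp only [List.foldl_cons, altStep, hD, hL, carOf, visitsOf, Bool.false_eq_true,
          if_neg, if_pos, not_false_eq_true]
        rw [ih, turnL_eq car]
      · by_cases hR : a == "TurnR"
        · simp only [List.foldl_cons, altStep, hD, hL, hR, carOf, visitsOf, Bool.false_eq_true,
            if_neg, if_pos, not_false_eq_true]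
          rw [ih, turnR_eq car]
        · simp [List.foldl_cons, altStep, hD, hL, hR, carOf, visitsOf, ih]

theorem sum_map_add {α : Type} (l : List α) (f g : α → Int) :
    (l.map fun x => f x + g x).sum = (l.map f).sum + (l.map g).sum := by
  induction l with
  | nil => simp
  | cons a rest ih => simp [ih]; ring

theorem sum_if_lookup (tolls : List (Int × Int × Int)) (p : Int × Int)
    (hnd : (tolls.map keyOf).Nodup) :
    (tolls.map (fun t => if p = keyOf t then t.2.2 else 0)).sum = pyTollLookup tolls p := by
  induction tolls with
  | nil => simp [pyTollLookup]
  | cons t rest ih =>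
    simp only [List.map_cons, List.nodup_cons] at hnd
    by_cases h : p = keyOf t
    · have hq' : (t.1 == p.1 && t.2.1 == p.2) = true := by
        simp only [keyOf, Prod.ext_iff] at h; simp [h.1, h.2]
      have hrest : (rest.map (fun u => if p = keyOf u then u.2.2 else 0)).sum = 0 := by
        apply List.sum_eq_zero
        intro x hx
        simp only [List.mem_map] at hx
        obtain ⟨u, hu, hxu⟩ := hx
        by_cases hpu : p = keyOf u
        · exfalso
          apply hnd.1
          refine List.mem_map.mpr ⟨u, hu, ?_⟩
          rw [← hpu]; exact h
        · rw [if_neg hpu] at hxu; omega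
      rw [List.map_cons, List.sum_cons, if_pos h, hrest, add_zero]
      simp [pyTollLookup, hq']
    · have hq' : (t.1 == p.1 && t.2.1 == p.2) = false := by
        simp only [keyOf, Prod.ext_iff] at h
        by_cases h1 : t.1 = p.1 <;> simp [h1] <;> omega
      have hl : pyTollLookup (t :: rest) p = pyTollLookup rest p := by
        simp [pyTollLookup, hq']
      simp [h, hl, ih hnd.2]

theorem sum_exchange (tolls : List (Int × Int × Int)) (hnd : (tolls.map keyOf).Nodup) :
    ∀ (vs : List (Int × Int)),
      (vs.map (pyTollLookup tolls)).sum
        = (tolls.map (fun t => t.2.2 * (vs.count (keyOf t) : Int))).sum := by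
  intro vs
  induction vs with
  | nil => simp
  | cons p vs ih =>
    have hsplit : (tolls.map (fun t => t.2.2 * (((p :: vs).count (keyOf t) : Nat) : Int))).sum
        = (tolls.map (fun t => t.2.2 * ((vs.count (keyOf t) : Nat) : Int))).sum
          + (tolls.map (fun t => if p = keyOf t then t.2.2 else 0)).sum := by
      rw [← sum_map_add]
      apply congrArg
      apply List.map_congr_left
      intro t _
      by_cases h : keyOf t = p
      · simp [List.count_cons, h]
        push_cast
        ring
      · simp [List.count_cons, h, Ne.symm h]
    simp only [List.map_cons, List.sum_cons, hsplit, ih, sum_if_lookup tolls p hnd]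
    ring

theorem tolling_spec : Claim_equal_tolling := by
  intro program start tolls _hdom hpre
  unfold Spec_tolling
  have hnd : (tolls.map keyOf).Nodup := hpre
  show (program.foldl (tollingStep tolls) (start, 0)).2
      = tolls.foldl (fun total t =>
          total + t.2.2 * (program.foldl altStep (start, PySem.Dict.empty)).2.getD (t.1, t.2.1) 0) 0
  rw [A_loop tolls hnd, B_loop]
  rw [PySem.List.foldl_add]
  rw [sum_exchange tolls hnd (visitsOf program start)]
  simp only [zero_add]
  apply congrArg
  apply List.map_congr_left
  intro t _
  rw [PySem.Dict.getD_foldl_insert_add_one]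
  simp [keyOf]
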